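-- pv_equiv track=rewrite | github.com/Jerempire/gym-anything | benchmarks/cua_world/environments/oracle_sql_developer_env/tasks/write_analytical_query/verifier.py | check_departments
-- ===== SOURCE A (Python) =====
-- def check_departments(rows):
--     valid_depts = {'FINANCE', 'IT', 'PURCHASING', 'SALES', 'SHIPPING'}
--     found_depts = set()
--     invalid_depts = set()
--     for r in rows:
--         dept = r.get('DEPARTMENT_NAME', '').strip().upper()
--         if dept:
--             found_depts.add(dept)
--             if dept not in valid_depts:
--                 invalid_depts.add(dept)
--     return found_depts, invalid_depts
-- ===== SOURCE B (Python) =====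
-- def check_departments(rows):
--     valid_depts = {'FINANCE', 'IT', 'PURCHASING', 'SALES', 'SHIPPING'}
--
--     def solve(rs):
--         # divide and conquer: conquer halves, merge the partial answers by set union
--         if not rs:
--             return set(), set()
--         if len(rs) == 1:
--             d = rs[0].get('DEPARTMENT_NAME', '').strip().upper()
--             if not d:
--                 return set(), set()
--             return {d}, (set() if d in valid_depts else {d})
--         mid = len(rs) // 2
--         f1, i1 = solve(rs[:mid])
--         f2, i2 = solve(rs[mid:])
--         return f1 | f2, i1 | i2
--
--     return solve(rows)
-- ===== Notes on version B (the rewrite author's own statement) =====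
-- stated objective: alternative
-- what changed: B replaces A's single linear loop maintaining two accumulators with an inner membership branch by a divide-and-conquer recursion: split the row list in half, solve each half recursively (base case classifies one row), and merge the two partial (found, invalid) answers by set union; correctness rests on set union being associative on the partial answers.
import Mathlib
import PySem

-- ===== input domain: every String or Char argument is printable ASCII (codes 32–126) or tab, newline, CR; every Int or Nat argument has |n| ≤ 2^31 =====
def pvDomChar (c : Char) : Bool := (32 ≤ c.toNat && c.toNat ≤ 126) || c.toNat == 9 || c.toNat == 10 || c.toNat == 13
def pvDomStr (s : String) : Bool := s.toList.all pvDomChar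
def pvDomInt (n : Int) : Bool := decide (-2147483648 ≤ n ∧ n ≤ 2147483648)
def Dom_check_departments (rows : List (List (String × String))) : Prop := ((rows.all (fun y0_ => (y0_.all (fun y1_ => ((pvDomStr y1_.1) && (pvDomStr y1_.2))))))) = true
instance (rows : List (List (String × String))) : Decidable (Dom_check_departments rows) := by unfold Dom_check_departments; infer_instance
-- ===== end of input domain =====

-- B solves the task by divide-and-conquer (split rows in half, recurse, merge partial answers by set union) instead of A's linear loop with two accumulators (alternative decomposition, same result).


-- ===== PORT A =====
-- the literal set {'FINANCE', 'IT', 'PURCHASING', 'SALES', 'SHIPPING'} (identical in both Pythons)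
def pvValid : PySem.Set String := PySem.Set.ofList ["FINANCE", "IT", "PURCHASING", "SALES", "SHIPPING"]

-- r.get('DEPARTMENT_NAME', '').strip().upper() (the identical normalization expression of both Pythons)
def pvDept (r : List (String × String)) : String :=
  PySem.Str.upper (PySem.Str.strip ((PySem.Dict.mk r).getD "DEPARTMENT_NAME" ""))

-- the body of A's for-loop: one row updates the pair (found, invalid)
def pvStepA (acc : PySem.Set String × PySem.Set String) (r : List (String × String)) :
    PySem.Set String × PySem.Set String :=
  let dept := pvDept r
  if dept ≠ "" then
    (PySem.Set.add acc.1 dept,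
     if ¬ (pvValid.contains dept = true) then PySem.Set.add acc.2 dept else acc.2)
  else acc

def check_departments (rows : List (List (String × String))) : List String × List String :=
  rows.foldl pvStepA (PySem.Set.empty, PySem.Set.empty)

-- ===== PORT B =====
-- Source B's `solve`: divide and conquer, merging the two partial answers with set union
def pvSolve (rs : List (List (String × String))) : PySem.Set String × PySem.Set String :=
  match rs with
  | [] => (PySem.Set.empty, PySem.Set.empty)
  | [r] =>
      let d := pvDept r
      if d = "" then (PySem.Set.empty, PySem.Set.empty)
      else (PySem.Set.ofList [d],
            if pvValid.contains d then PySem.Set.empty else PySem.Set.ofList [d])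
  | r1 :: r2 :: rest =>
      let rs' := r1 :: r2 :: rest
      let mid := rs'.length / 2
      let p1 := pvSolve (rs'.take mid)
      let p2 := pvSolve (rs'.drop mid)
      (PySem.Set.union p1.1 p2.1, PySem.Set.union p1.2 p2.2)
termination_by rs.length
decreasing_by
  · simp [List.length_take]; omega
  · simp [List.length_drop]; omega

def check_departments_alt (rows : List (List (String × String))) : List String × List String :=
  pvSolve rows

-- ===== PRECONDITION & SPEC =====
def Spec_check_departments (rows : List (List (String × String))) (out : List String × List String) : Prop := out = check_departments_alt rows
instance (rows : List (List (String × String))) (out : List String × List String) : Decidable (Spec_check_departments rows out) := by unfold Spec_check_departments; infer_instance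

-- ===== CLAIM =====
def Claim_equal_check_departments : Prop := ∀ (rows : List (List (String × String))), Dom_check_departments rows → Spec_check_departments rows (check_departments rows)

-- ===== LEMMAS AND PROOFS =====

-- the non-empty normalized names of the rows, in order
def pvNames (rs : List (List (String × String))) : List String :=
  (rs.map pvDept).filter (fun d => d ≠ "")

-- those among them that are not valid
def pvInv (rs : List (List (String × String))) : List String :=
  (rs.map pvDept).filter (fun d => d ≠ "" ∧ ¬ (pvValid.contains d = true))

lemma pvNames_append (l r : List (List (String × String))) :
    pvNames (l ++ r) = pvNames l ++ pvNames r := by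
  simp [pvNames]

lemma pvInv_append (l r : List (List (String × String))) :
    pvInv (l ++ r) = pvInv l ++ pvInv r := by
  simp [pvInv]

-- A's fold from any start (f, i) just updates each component with the corresponding name list
lemma pvA_char (rows : List (List (String × String))) (f i : PySem.Set String) :
    rows.foldl pvStepA (f, i)
      = (PySem.Set.update f (pvNames rows), PySem.Set.update i (pvInv rows)) := by
  induction rows generalizing f i with
  | nil => simp [pvNames, pvInv, PySem.Set.update]
  | cons r rows ih =>
    rw [List.foldl_cons]
    by_cases hd : pvDept r = ""
    · simp only [pvStepA, hd, ne_eq, not_true_eq_false, if_false]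
      rw [ih]
      simp [pvNames, pvInv, hd]
    · by_cases hm : pvDept r ∈ pvValid
      · have hv : pvValid.contains (pvDept r) = true := (PySem.Set.contains_iff _ _).mpr hm
        simp only [pvStepA, ne_eq, hd, not_false_eq_true, if_true, hv, not_true_eq_false,
          if_false]
        rw [ih]
        simp [pvNames, pvInv, hd, hm, PySem.Set.update_cons]
      · have hv : ¬ pvValid.contains (pvDept r) = true :=
          fun h => hm ((PySem.Set.contains_iff _ _).mp h)
        simp only [pvStepA, ne_eq, hd, not_false_eq_true, if_true]
        rw [if_pos hv, ih]
        simp [pvNames, pvInv, hd, hm, PySem.Set.update_cons]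

-- updating with a deduplicated list is updating with the original list
lemma pv_update_ofList (xs : List String) (s : PySem.Set String) :
    PySem.Set.update s (PySem.Set.ofList xs) = PySem.Set.update s xs := by
  induction xs using List.reverseRecOn generalizing s with
  | nil => rfl
  | append_singleton xs x ih =>
    rw [PySem.Set.ofList_append_singleton]
    by_cases hx : x ∈ PySem.Set.ofList xs
    · have hx' : x ∈ xs := (PySem.Set.mem_ofList _ _).mp hx
      have hmem : x ∈ PySem.Set.update s xs := (PySem.Set.mem_update _ _ _).mpr (Or.inr hx')
      rw [PySem.Set.add_of_mem hx, ih, PySem.Set.update_append]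
      exact (PySem.Set.add_of_mem hmem).symm
    · rw [PySem.Set.add_of_not_mem hx, PySem.Set.update_append, PySem.Set.update_append, ih]

-- union of two deduplicated lists is the deduplication of the concatenation
lemma pv_union_ofList (xs ys : List String) :
    PySem.Set.union (PySem.Set.ofList xs) (PySem.Set.ofList ys)
      = PySem.Set.ofList (xs ++ ys) := by
  rw [PySem.Set.ofList_append]
  show PySem.Set.update (PySem.Set.ofList xs) (PySem.Set.ofList ys) = _
  rw [pv_update_ofList]

-- B's divide-and-conquer computes the same (found, invalid) characterization
lemma pvSolve_char (rs : List (List (String × String))) :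
    pvSolve rs = (PySem.Set.ofList (pvNames rs), PySem.Set.ofList (pvInv rs)) := by
  induction rs using pvSolve.induct with
  | case1 => simp [pvSolve, pvNames, pvInv]
  | case2 r d h =>
    have h' : pvDept r = "" := h
    simp [pvSolve, h', pvNames, pvInv]
  | case3 r d h =>
    have h' : ¬ pvDept r = "" := h
    by_cases hm : pvDept r ∈ pvValid
    · simp [pvSolve, h', hm, pvNames, pvInv]
    · simp [pvSolve, h', hm, pvNames, pvInv]
  | case4 r1 r2 rest rs0 mid0 ih1 ih2 =>
    rw [pvSolve]
    rw [ih1, ih2]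
    simp only [pv_union_ofList, ← pvNames_append, ← pvInv_append, List.take_append_drop]
    rfl

-- ===== VERDICT =====
theorem check_departments_spec : Claim_equal_check_departments := by
  intro rows _
  unfold Spec_check_departments check_departments check_departments_alt
  rw [pvA_char, pvSolve_char]
  rfl
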